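-- pv_equiv track=rewrite | github.com/lawang24/competitive-programming-archive | Codeforces/old_code/952/C.py | solve
-- ===== SOURCE A (Python) =====
-- def solve(nums):
--     champ = 0
--     ans = 0
--
--     sums = [0 for _ in range(len(nums))]
--
--     for i in range(len(sums)):
--         if i:
--             sums[i] = sums[i-1]+nums[i]
--         else:
--             sums[i] = nums[i]
--         champ = max(champ, nums[i])
--         if sums[i]-champ == champ:
--             ans+=1
--
--     return ans
-- ===== SOURCE B (Python) =====
-- def solve(nums):
--     # Divide and conquer: count matching prefixes in each half; the right half is
--     # counted under the left half's total sum and 0-clamped maximum.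
--     def count(xs, s, m):
--         if not xs:
--             return 0
--         if len(xs) == 1:
--             return 1 if s + xs[0] == 2 * max(m, xs[0]) else 0
--         h = len(xs) // 2
--         left, right = xs[:h], xs[h:]
--         return count(left, s, m) + count(right, s + sum(left), max(m, max(left)))
--     return count(nums, 0, 0)
-- ===== Notes on version B (the rewrite author's own statement) =====
-- stated objective: alternative
-- what changed: Replaces A's single iterative index loop with running accumulators and a preallocated sums array by a recursive divide-and-conquer: split the list in half, count matching prefixes in the left half, then count in the right half under the left half's total sum and clamped maximum (computed with sum()/max()).
import Mathlib
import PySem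

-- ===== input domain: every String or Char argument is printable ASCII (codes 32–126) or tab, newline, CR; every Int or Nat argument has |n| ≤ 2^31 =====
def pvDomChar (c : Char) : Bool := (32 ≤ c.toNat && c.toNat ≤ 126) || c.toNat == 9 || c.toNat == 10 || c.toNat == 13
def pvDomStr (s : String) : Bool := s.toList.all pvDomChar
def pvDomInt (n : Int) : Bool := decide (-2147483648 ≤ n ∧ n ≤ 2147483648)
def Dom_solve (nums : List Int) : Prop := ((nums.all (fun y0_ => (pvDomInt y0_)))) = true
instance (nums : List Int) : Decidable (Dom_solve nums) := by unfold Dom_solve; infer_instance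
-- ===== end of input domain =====

-- B replaces A's single iterative accumulator loop by a recursive divide-and-conquer count
-- over list halves; objective: alternative (genuinely different structure, similar cost).

-- ===== PORT A =====
-- literal transliteration of A: zero-filled sums array, index loop, in-place writes
def solve (nums : List Int) : Int :=
  let sums0 : List Int := (List.range nums.length).map (fun _ => (0 : Int))
  let st := (List.range sums0.length).foldl
    (fun (st : Int × Int × List Int) i =>
      let champ := st.1
      let ans := st.2.1
      let sums := st.2.2
      let sums := if i ≠ 0 then sums.set i (sums.getD (i-1) 0 + nums.getD i 0)
                  else sums.set i (nums.getD i 0)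
      let champ := max champ (nums.getD i 0)
      let ans := if sums.getD i 0 - champ == champ then ans + 1 else ans
      (champ, ans, sums)) ((0 : Int), (0 : Int), sums0)
  st.2.1

-- ===== PORT B =====
-- Python max(l) on a nonempty list (B only applies it to the nonempty left half)
def pymax : List Int → Int
  | [] => 0
  | x :: xs => xs.foldl max x

-- the inner recursive helper `count(xs, s, m)` of Source B, step for step
-- Source B's local h = len(xs)//2 is inlined as xs.length / 2
def goB (xs : List Int) (s m : Int) : Int :=
  if h0 : xs = [] then 0
  else if h1 : xs.length = 1 then
    if s + xs.getD 0 0 == 2 * max m (xs.getD 0 0) then 1 else 0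
  else
    goB (xs.take (xs.length / 2)) s m +
      goB (xs.drop (xs.length / 2)) (s + (xs.take (xs.length / 2)).foldl (·+·) 0)
        (max m (pymax (xs.take (xs.length / 2))))
termination_by xs.length
decreasing_by
  all_goals
    have hp : 0 < xs.length := List.length_pos_iff.mpr h0
    simp only [List.length_take, List.length_drop]
    omega

def solve_alt (nums : List Int) : Int := goB nums 0 0

-- ===== PRECONDITION & SPEC =====
def Spec_solve (nums : List Int) (out : Int) : Prop := out = solve_alt nums
instance (nums : List Int) (out : Int) : Decidable (Spec_solve nums out) := by unfold Spec_solve; infer_instance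

-- ===== CLAIM (what is proved, stated in full; the proofs are below) =====
def Claim_equal_solve : Prop := ∀ (nums : List Int), Dom_solve nums → Spec_solve nums (solve nums)

-- ===== LEMMAS AND PROOFS =====

-- common reference: count of prefixes (of the suffix, under accumulators s, m) whose sum equals twice their max
def cntF (s m : Int) : List Int → Int
  | [] => 0
  | x :: xs => (if s + x == 2 * max m x then 1 else 0) + cntF (s + x) (max m x) xs

lemma cntF_append (l : List Int) (a : Int) : ∀ s m : Int,
    cntF s m (l ++ [a]) = cntF s m l +
      (if l.foldl (·+·) s + a == 2 * max (l.foldl max m) a then 1 else 0) := by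
  induction l with
  | nil => intro s m; simp [cntF]
  | cons x xs ih =>
      intro s m
      simp only [List.cons_append, cntF, List.foldl_cons]
      rw [ih]
      split_ifs <;> ring

lemma foldl_max_max (l : List Int) : ∀ a b : Int,
    l.foldl max (max a b) = max a (l.foldl max b) := by
  induction l with
  | nil => intro a b; simp
  | cons x xs ih =>
      intro a b
      simp only [List.foldl_cons, max_assoc]
      exact ih a (max b x)

lemma foldl_add_shift (l : List Int) : ∀ s : Int,
    l.foldl (·+·) s = s + l.foldl (·+·) 0 := by
  induction l with
  | nil => intro s; simp
  | cons x xs ih =>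
      intro s
      simp only [List.foldl_cons, zero_add]
      rw [ih (s + x), ih x]
      ring

lemma max_pymax (l : List Int) (hl : l ≠ []) (m : Int) :
    max m (pymax l) = l.foldl max m := by
  cases l with
  | nil => exact absurd rfl hl
  | cons x xs =>
      simp only [pymax, List.foldl_cons]
      rw [foldl_max_max xs m x]

lemma cntF_split (L R : List Int) : ∀ s m : Int,
    cntF s m (L ++ R) = cntF s m L + cntF (L.foldl (·+·) s) (L.foldl max m) R := by
  induction L with
  | nil => intro s m; simp [cntF]
  | cons x xs ih =>
      intro s m
      simp only [List.cons_append, cntF, List.foldl_cons]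
      rw [ih]
      ring

lemma goB_eq_cntF (n : Nat) : ∀ (xs : List Int), xs.length = n → ∀ s m : Int,
    goB xs s m = cntF s m xs := by
  induction n using Nat.strong_induction_on with
  | _ n ih =>
      intro xs hn s m
      rw [goB]
      by_cases h0 : xs = []
      · subst h0; simp [cntF]
      · rw [dif_neg h0]
        by_cases h1 : xs.length = 1
        · rw [dif_pos h1]
          match xs, h1 with
          | [x], _ => simp [cntF]
        · rw [dif_neg h1]
          have hlen : 2 ≤ xs.length := by
            have := List.length_pos_iff.mpr h0
            omega
          have hh1 : 1 ≤ xs.length / 2 := by omega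
          have hh2 : xs.length / 2 < xs.length := by omega
          have htl : (xs.take (xs.length / 2)).length = xs.length / 2 := by
            simp; omega
          have hdl : (xs.drop (xs.length / 2)).length = xs.length - xs.length / 2 := by
            simp
          have htne : xs.take (xs.length / 2) ≠ [] := by
            intro h; rw [h] at htl; simp at htl; omega
          rw [ih (xs.length / 2) (by omega) _ htl,
              ih (xs.length - xs.length / 2) (by omega) _ hdl]
          have hsplit := cntF_split (xs.take (xs.length / 2)) (xs.drop (xs.length / 2)) s m
          rw [List.take_append_drop] at hsplit
          rw [hsplit, max_pymax _ htne, foldl_add_shift _ s]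

lemma solve_alt_eq_cntF (nums : List Int) : solve_alt nums = cntF 0 0 nums :=
  goB_eq_cntF nums.length nums rfl 0 0

-- A-side loop invariant
lemma solve_invariant (nums : List Int) : ∀ k : Nat, k ≤ nums.length →
    ∃ sums : List Int,
      ((List.range k).foldl
        (fun (st : Int × Int × List Int) i =>
          let champ := st.1
          let ans := st.2.1
          let sums := st.2.2
          let sums := if i ≠ 0 then sums.set i (sums.getD (i-1) 0 + nums.getD i 0)
                      else sums.set i (nums.getD i 0)
          let champ := max champ (nums.getD i 0)
          let ans := if sums.getD i 0 - champ == champ then ans + 1 else ans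
          (champ, ans, sums))
        ((0 : Int), (0 : Int), (List.range nums.length).map (fun _ => (0 : Int))))
      = ((nums.take k).foldl max 0, cntF 0 0 (nums.take k), sums)
      ∧ sums.length = nums.length
      ∧ (0 < k → sums.getD (k-1) 0 = (nums.take k).foldl (·+·) 0) := by
  intro k
  induction k with
  | zero =>
      intro _
      refine ⟨(List.range nums.length).map (fun _ => (0 : Int)), ?_, by simp, by simp⟩
      simp [cntF]
  | succ k ih =>
      intro hk
      obtain ⟨sums, heq, hlen, hlast⟩ := ih (Nat.le_of_succ_le hk)
      have hklt : k < nums.length := hk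
      have htake : nums.take (k+1) = nums.take k ++ [nums.getD k 0] := by
        rw [List.getD_eq_getElem _ _ hklt]
        exact List.take_succ_eq_append_getElem hklt
      set a := nums.getD k 0 with ha
      have hval : (if k ≠ 0 then sums.set k (sums.getD (k-1) 0 + a) else sums.set k a)
          = sums.set k ((nums.take (k+1)).foldl (·+·) 0) := by
        by_cases h0 : k = 0
        · subst h0
          simp [htake]
        · rw [if_pos h0, hlast (Nat.pos_of_ne_zero h0), htake, List.foldl_append]
          simp
      have hmax : max ((nums.take k).foldl max 0) a = (nums.take (k+1)).foldl max 0 := by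
        rw [htake, List.foldl_append]; simp
      have hgetk : (sums.set k ((nums.take (k+1)).foldl (·+·) 0)).getD k 0
          = (nums.take (k+1)).foldl (·+·) 0 := by
        rw [List.getD_eq_getElem?_getD, List.getElem?_set_self (by omega)]
        simp
      have hcnt : cntF 0 0 (nums.take (k+1)) = cntF 0 0 (nums.take k) +
          (if (nums.take k).foldl (·+·) 0 + a == 2 * max ((nums.take k).foldl max 0) a
           then 1 else 0) := by
        rw [htake, cntF_append]
      have hcond : ((nums.take (k+1)).foldl (·+·) 0 - max ((nums.take k).foldl max 0) a
              == max ((nums.take k).foldl max 0) a)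
            = ((nums.take k).foldl (·+·) 0 + a == 2 * max ((nums.take k).foldl max 0) a) := by
        have hsum : (nums.take (k+1)).foldl (·+·) 0 = (nums.take k).foldl (·+·) 0 + a := by
          rw [htake, List.foldl_append]; simp
        rw [hsum]
        by_cases h : (nums.take k).foldl (·+·) 0 + a = 2 * max ((nums.take k).foldl max 0) a
        · simp [h]; omega
        · have h2 : ¬((nums.take k).foldl (·+·) 0 + a - max ((nums.take k).foldl max 0) a
              = max ((nums.take k).foldl max 0) a) := by omega
          simp [h, h2]
      rw [List.range_succ, List.foldl_append, heq]
      simp only [List.foldl_cons, List.foldl_nil, ← ha]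
      rw [hval]
      refine ⟨sums.set k ((nums.take (k+1)).foldl (·+·) 0), ?_, by simp [hlen], ?_⟩
      · rw [hgetk, hcond, hcnt, hmax]
        split_ifs with h <;> simp
      · intro _
        simp only [Nat.add_sub_cancel]
        rw [List.getD_eq_getElem?_getD, List.getElem?_set_self (by omega)]
        simp

-- ===== VERDICT (by name: the statement is the Claim_ definition above) =====
theorem solve_spec : Claim_equal_solve := by
  intro nums _
  unfold Spec_solve
  rw [solve_alt_eq_cntF]
  obtain ⟨sums, heq, -, -⟩ := solve_invariant nums nums.length (le_refl _)
  simp only [solve, List.length_map, List.length_range]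
  rw [heq]
  simp
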